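-- pv_equiv track=rewrite | github.com/DSW41923/AoC_DSW41923 | 2024/Day_12.py | get_map_data
-- ===== SOURCE A (Python) =====
-- from itertools import product
--
-- def get_map_data(input_string):
--     garden_map = list(map(list, input_string.split('\n')))
--     x_range = len(garden_map)
--     y_range = len(garden_map[0])
--     ungrouped_regions = {}
--     for x in range(x_range):
--         for y in range(y_range):
--             if garden_map[x][y] in ungrouped_regions:
--                 ungrouped_regions[garden_map[x][y]] += [(x, y)]
--             else:
--                 ungrouped_regions[garden_map[x][y]] = [(x, y)]
--
--     regions = {}
--     for plant in ungrouped_regions: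
--         regions[plant] = []
--         while ungrouped_regions[plant]:
--             new_region = [ungrouped_regions[plant].pop(0)]
--             found_adjacent = True
--             while found_adjacent:
--                 found_adjacent = False
--                 for o, n in product(ungrouped_regions[plant], new_region):
--                     if (o[0]-n[0])**2+(o[1]-n[1])**2 == 1:
--                         new_region += [o]
--                         ungrouped_regions[plant].remove(o)
--                         found_adjacent = True
--                         break
--             regions[plant].append(new_region)
--     return garden_map, x_range, y_range, regions
-- ===== SOURCE B (Python) =====
-- def get_map_data(input_string):
--     garden_map = [list(line) for line in input_string.split('\n')]
--     x_range = len(garden_map)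
--     y_range = len(garden_map[0])
--     cells_by_plant = {}
--     for x in range(x_range):
--         for y in range(y_range):
--             p = garden_map[x][y]
--             cells_by_plant[p] = cells_by_plant.get(p, []) + [(x, y)]
--     regions = {}
--     for plant, cells in cells_by_plant.items():
--         unvisited = set(cells)
--         plant_regions = []
--         while unvisited:
--             seed = min(unvisited)
--             unvisited.discard(seed)
--             region = [seed]
--             frontier = set()
--             for nb in ((seed[0] - 1, seed[1]), (seed[0] + 1, seed[1]),
--                        (seed[0], seed[1] - 1), (seed[0], seed[1] + 1)):
--                 if nb in unvisited:
--                     unvisited.discard(nb)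
--                     frontier.add(nb)
--             while frontier:
--                 c = min(frontier)
--                 frontier.discard(c)
--                 region.append(c)
--                 for nb in ((c[0] - 1, c[1]), (c[0] + 1, c[1]),
--                            (c[0], c[1] - 1), (c[0], c[1] + 1)):
--                     if nb in unvisited:
--                         unvisited.discard(nb)
--                         frontier.add(nb)
--             plant_regions.append(region)
--         regions[plant] = plant_regions
--     return garden_map, x_range, y_range, regions
-- ===== Notes on version B (the rewrite author's own statement) =====
-- stated objective: faster
-- what changed: Regions are built by a best-first flood fill: cells move from an unvisited set into a frontier set via O(1) four-neighbour membership tests and the next cell is min() of the frontier (valid because A's remaining list is row-major sorted, so A's 'first remaining cell adjacent to the region' is exactly the frontier minimum), replacing A's repeated rescans of the remaining-times-region pair product with a squared-distance test.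
import Mathlib
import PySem

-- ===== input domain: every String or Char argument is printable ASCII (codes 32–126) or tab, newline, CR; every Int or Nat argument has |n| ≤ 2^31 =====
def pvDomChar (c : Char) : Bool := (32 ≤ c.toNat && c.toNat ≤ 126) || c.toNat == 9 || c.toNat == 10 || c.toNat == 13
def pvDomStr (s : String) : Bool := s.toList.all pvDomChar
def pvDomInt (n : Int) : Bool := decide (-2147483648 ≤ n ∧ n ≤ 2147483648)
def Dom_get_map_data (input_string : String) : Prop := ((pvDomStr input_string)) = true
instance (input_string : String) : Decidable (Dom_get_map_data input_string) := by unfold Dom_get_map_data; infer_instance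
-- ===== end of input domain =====

-- B replaces A's repeated scan of the remaining×region pair product (squared-distance test
-- after every added cell) by a best-first flood fill: an unvisited set, a frontier set fed by
-- four-neighbour membership tests, and min() of the frontier as the next cell (objective: faster).

-- ===== PORT A =====
-- 'for o, n in product(ungrouped, new_region): if (o[0]-n[0])**2+(o[1]-n[1])**2 == 1'
-- product iterates o in the outer position, so the chosen o is the first element of
-- ungrouped adjacent to any region cell.
def pvAdjA (o : Int × Int) (reg : List (Int × Int)) : Bool :=
  reg.any (fun n => (o.1 - n.1) ^ 2 + (o.2 - n.2) ^ 2 == 1)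

-- A's inner 'while found_adjacent' loop: each pass appends the first adjacent remaining cell
-- to the region and removes it, or stops.  Each pass removes one element of ung, so
-- fuel = ung.length can never be exhausted before the loop's own exit condition fires.
def pvGrowA : Nat → List (Int × Int) → List (Int × Int) → List (Int × Int) × List (Int × Int)
  | 0, reg, ung => (reg, ung)
  | fuel + 1, reg, ung =>
    match ung.find? (fun o => pvAdjA o reg) with
    | none => (reg, ung)
    | some o => pvGrowA fuel (reg ++ [o]) ((PySem.List.remove? ung o).getD ung)

-- A's outer 'while ungrouped_regions[plant]' loop: pop(0) a seed, grow its region.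
-- Each iteration shortens the list, so fuel = initial length bounds the loop exactly.
def pvSplitA : Nat → List (Int × Int) → List (List (Int × Int))
  | _, [] => []
  | 0, _ :: _ => []
  | fuel + 1, c :: rest =>
    let p := pvGrowA rest.length [c] rest
    p.1 :: pvSplitA fuel p.2

def get_map_data (input_string : String) : List (List String) × Int × Int × (List (String × List (List (Int × Int)))) :=
  let garden_map : List (List String) :=
    ((PySem.Str.split? input_string "\n").getD []).map (fun (l : String) => l.toList.map fun c => String.mk [c])
  let x_range : Int := PySem.List.len garden_map
  let y_range : Int := PySem.List.len (PySem.List.pyGetD garden_map 0 [])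
  let ungrouped : PySem.Dict String (List (Int × Int)) :=
    (PySem.List.pyRange 0 x_range 1).foldl (fun d x =>
      (PySem.List.pyRange 0 y_range 1).foldl (fun d y =>
        let p := PySem.List.pyGetD (PySem.List.pyGetD garden_map x []) y ""
        match d.get? p with
        | some v => d.insert p (v ++ [(x, y)])
        | none => d.insert p [(x, y)]) d) PySem.Dict.empty
  let regions : PySem.Dict String (List (List (Int × Int))) :=
    ungrouped.items.foldl (fun r pr => r.insert pr.1 (pvSplitA pr.2.length pr.2)) PySem.Dict.empty
  (garden_map, x_range, y_range, regions.items)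

-- ===== PORT B =====
-- the tuple of the four neighbours of a cell
def pvNbrs (c : Int × Int) : List (Int × Int) :=
  [(c.1 - 1, c.2), (c.1 + 1, c.2), (c.1, c.2 - 1), (c.1, c.2 + 1)]

-- 'for nb in (…4 neighbours…): if nb in unvisited: unvisited.discard(nb); frontier.add(nb)'
def pvMoveNbrs (c : Int × Int) (fu : PySem.Set (Int × Int) × PySem.Set (Int × Int)) :
    PySem.Set (Int × Int) × PySem.Set (Int × Int) :=
  (pvNbrs c).foldl (fun fu nb =>
    if PySem.Set.contains fu.2 nb then (PySem.Set.add fu.1 nb, PySem.Set.discard fu.2 nb) else fu) fu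

-- Python tuple comparison (lexicographic) on coordinate pairs
def pvLtb (a b : Int × Int) : Bool := a.1 < b.1 || (a.1 == b.1 && a.2 < b.2)

-- min(s) over a Python set of pairs: the value is the unique least element, independent of
-- the set's iteration order, so a fold over the underlying distinct-element list is exact.
def pvMin? : List (Int × Int) → Option (Int × Int)
  | [] => none
  | x :: xs => some (xs.foldl (fun m c => if pvLtb c m then c else m) x)

-- B's 'while frontier' loop: pop min of frontier, append it, move its unvisited neighbours
-- into the frontier.  Each pass removes one element of frontier ∪ unvisited, so
-- fuel = |frontier| + |unvisited| can never be exhausted before the loop's exit fires.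
def pvGrowB : Nat → List (Int × Int) → PySem.Set (Int × Int) → PySem.Set (Int × Int) →
    List (Int × Int) × PySem.Set (Int × Int)
  | 0, region, _, unvisited => (region, unvisited)
  | fuel + 1, region, frontier, unvisited =>
    match pvMin? frontier with
    | none => (region, unvisited)
    | some c =>
      let fu := pvMoveNbrs c (PySem.Set.discard frontier c, unvisited)
      pvGrowB fuel (region ++ [c]) fu.1 fu.2

-- B's 'while unvisited' loop: seed = min(unvisited), flood-fill its region.
-- Each iteration removes at least the seed, so fuel = |unvisited| bounds the loop.
def pvSplitB : Nat → PySem.Set (Int × Int) → List (List (Int × Int))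
  | 0, _ => []
  | fuel + 1, unvisited =>
    match pvMin? unvisited with
    | none => []
    | some seed =>
      let fu := pvMoveNbrs seed (PySem.Set.empty, PySem.Set.discard unvisited seed)
      let p := pvGrowB (fu.1.length + fu.2.length) [seed] fu.1 fu.2
      p.1 :: pvSplitB fuel p.2

def get_map_data_alt (input_string : String) : List (List String) × Int × Int × (List (String × List (List (Int × Int)))) :=
  let garden_map : List (List String) :=
    ((PySem.Str.split? input_string "\n").getD []).map (fun (l : String) => l.toList.map fun c => String.mk [c])
  let x_range : Int := PySem.List.len garden_map
  let y_range : Int := PySem.List.len (PySem.List.pyGetD garden_map 0 [])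
  let cells_by_plant : PySem.Dict String (List (Int × Int)) :=
    (PySem.List.pyRange 0 x_range 1).foldl (fun d x =>
      (PySem.List.pyRange 0 y_range 1).foldl (fun d y =>
        let p := PySem.List.pyGetD (PySem.List.pyGetD garden_map x []) y ""
        d.insert p (d.getD p [] ++ [(x, y)])) d) PySem.Dict.empty
  let regions : PySem.Dict String (List (List (Int × Int))) :=
    cells_by_plant.items.foldl (fun r pr =>
      r.insert pr.1 (pvSplitB (PySem.Set.ofList pr.2).length (PySem.Set.ofList pr.2))) PySem.Dict.empty
  (garden_map, x_range, y_range, regions.items)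

-- ===== PRECONDITION & SPEC =====
-- Pre_ excludes exactly the inputs on which A raises IndexError: those where some line is
-- shorter than the first line (A indexes every row at all columns of the first line).
def Pre_get_map_data (input_string : String) : Prop :=
  ∀ l ∈ (PySem.Str.split? input_string "\n").getD [],
    (PySem.List.pyGetD ((PySem.Str.split? input_string "\n").getD []) 0 "").toList.length ≤ l.toList.length
instance (input_string : String) : Decidable (Pre_get_map_data input_string) := by
  unfold Pre_get_map_data; infer_instance

def pvWitness_get_map_data : String := "AAB\nBBA"

-- DecidableEq of the output type, assembled stepwise (plain instance search exceeds its default size limit)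
def pvDecEqOut : DecidableEq (List (List String) × Int × Int × (List (String × List (List (Int × Int))))) := by
  letI h2 : DecidableEq (List (String × List (List (Int × Int)))) := inferInstance
  letI h3 : DecidableEq (Int × List (String × List (List (Int × Int)))) := @instDecidableEqProd _ _ _ h2
  letI h4 : DecidableEq (Int × Int × List (String × List (List (Int × Int)))) := @instDecidableEqProd _ _ _ h3
  exact @instDecidableEqProd _ _ _ h4

def Spec_get_map_data (input_string : String) (out : List (List String) × Int × Int × (List (String × List (List (Int × Int))))) : Prop := out = get_map_data_alt input_string
instance (input_string : String) (out : List (List String) × Int × Int × (List (String × List (List (Int × Int))))) : Decidable (Spec_get_map_data input_string out) := by unfold Spec_get_map_data; exact pvDecEqOut out _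

-- ===== CLAIM (what is proved, stated in full; the proofs are below) =====
def Claim_equal_get_map_data : Prop := ∀ (input_string : String), Dom_get_map_data input_string → Pre_get_map_data input_string → Spec_get_map_data input_string (get_map_data input_string)

-- ===== LEMMAS AND PROOFS =====

lemma pvSq1 (a b : Int) :
    a ^ 2 + b ^ 2 = 1 ↔ (a = 1 ∧ b = 0) ∨ (a = -1 ∧ b = 0) ∨ (a = 0 ∧ b = 1) ∨ (a = 0 ∧ b = -1) := by
  constructor
  · intro h
    have ha1 : a ≤ 1 := by nlinarith [sq_nonneg a, sq_nonneg b]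
    have ha2 : -1 ≤ a := by nlinarith [sq_nonneg a, sq_nonneg b]
    have hb1 : b ≤ 1 := by nlinarith [sq_nonneg a, sq_nonneg b]
    have hb2 : -1 ≤ b := by nlinarith [sq_nonneg a, sq_nonneg b]
    interval_cases a <;> interval_cases b <;> norm_num at h <;> tauto
  · rintro (⟨rfl, rfl⟩ | ⟨rfl, rfl⟩ | ⟨rfl, rfl⟩ | ⟨rfl, rfl⟩) <;> norm_num

-- membership in the neighbour tuple is A's squared-distance-1 test
lemma pvMem_nbrs (x c : Int × Int) :
    x ∈ pvNbrs c ↔ ((x.1 - c.1) ^ 2 + (x.2 - c.2) ^ 2 == 1) = true := by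
  obtain ⟨x1, x2⟩ := x; obtain ⟨c1, c2⟩ := c
  simp only [pvNbrs, List.mem_cons, List.not_mem_nil, or_false, beq_iff_eq, pvSq1,
    Prod.mk.injEq]
  omega

-- adjacency to reg ++ [c] splits
lemma pvAdjA_append (x c : Int × Int) (reg : List (Int × Int)) :
    pvAdjA x (reg ++ [c]) = (pvAdjA x reg || decide (x ∈ pvNbrs c)) := by
  unfold pvAdjA
  rw [List.any_append]
  congr 1
  simp only [List.any_cons, List.any_nil, Bool.or_false]
  rw [Bool.eq_iff_iff, decide_eq_true_iff, pvMem_nbrs]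

-- lex order: irreflexive, asymmetric, total on distinct pairs, transitive
lemma pvLtb_irrefl (a : Int × Int) : pvLtb a a = false := by
  simp [pvLtb]
lemma pvLtb_asymm {a b : Int × Int} (h : pvLtb a b = true) : pvLtb b a = false := by
  obtain ⟨a1, a2⟩ := a; obtain ⟨b1, b2⟩ := b
  simp only [pvLtb, Bool.or_eq_true, decide_eq_true_eq, Bool.and_eq_true, beq_iff_eq,
    Bool.or_eq_false_iff, Bool.and_eq_false_iff, decide_eq_false_iff_not, not_lt,
    beq_eq_false_iff_ne, ne_eq] at h ⊢
  omega
lemma pvLtb_total {a b : Int × Int} (h : a ≠ b) : pvLtb a b = true ∨ pvLtb b a = true := by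
  obtain ⟨a1, a2⟩ := a; obtain ⟨b1, b2⟩ := b
  have h' : ¬ (a1 = b1 ∧ a2 = b2) := by simpa [Prod.ext_iff] using h
  simp only [pvLtb, Bool.or_eq_true, decide_eq_true_eq, Bool.and_eq_true, beq_iff_eq]
  omega
lemma pvLtb_trans {a b c : Int × Int} (h1 : pvLtb a b = true) (h2 : pvLtb b c = true) :
    pvLtb a c = true := by
  obtain ⟨a1, a2⟩ := a; obtain ⟨b1, b2⟩ := b; obtain ⟨c1, c2⟩ := c
  simp only [pvLtb, Bool.or_eq_true, decide_eq_true_eq, Bool.and_eq_true, beq_iff_eq] at h1 h2 ⊢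
  omega
lemma pvLtb_ne {a b : Int × Int} (h : pvLtb a b = true) : a ≠ b := by
  intro he; rw [he, pvLtb_irrefl] at h; exact absurd h (by simp)

-- pvMin? returns an element no other element is below
lemma pvFoldMin_spec : ∀ (xs : List (Int × Int)) (x : Int × Int),
    (xs.foldl (fun m c => if pvLtb c m then c else m) x ∈ x :: xs) ∧
    ∀ y ∈ x :: xs, pvLtb y (xs.foldl (fun m c => if pvLtb c m then c else m) x) = false := by
  intro xs
  induction xs with
  | nil =>
    intro x
    refine ⟨by simp, fun y hy => ?_⟩
    rw [List.mem_singleton] at hy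
    rw [hy, List.foldl_nil, pvLtb_irrefl]
  | cons c rest ih =>
    intro x
    rw [List.foldl_cons]
    obtain ⟨hmem, hmin⟩ := ih (if pvLtb c x then c else x)
    set x' := if pvLtb c x then c else x with hx'
    set m := rest.foldl (fun m c => if pvLtb c m then c else m) x' with hm
    have hx'm : pvLtb x' m = false := hmin x' List.mem_cons_self
    have key : ∀ y : Int × Int, (y = x ∨ y = c) → pvLtb y m = false := by
      intro y hy
      by_cases hlt : pvLtb y m = true
      · exfalso
        by_cases hcx : pvLtb c x = true
        · -- x' = c
          have hxc : x' = c := by rw [hx', if_pos hcx]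
          rcases hy with rfl | rfl
          · -- y = x, lt c x, lt x m → lt c m contradicts hx'm
            have := pvLtb_trans hcx hlt
            rw [← hxc] at this
            rw [this] at hx'm; exact absurd hx'm (by simp)
          · rw [← hxc] at hlt; rw [hlt] at hx'm; exact absurd hx'm (by simp)
        · -- x' = x
          have hxx : x' = x := by rw [hx', if_neg hcx]
          rcases hy with rfl | rfl
          · rw [← hxx] at hlt; rw [hlt] at hx'm; exact absurd hx'm (by simp)
          · -- y = c, ¬ lt c x
            by_cases hce : y = x
            · subst hce; rw [← hxx] at hlt; rw [hlt] at hx'm; exact absurd hx'm (by simp)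
            · rcases pvLtb_total hce with h1 | h2
              · exact hcx h1
              · have := pvLtb_trans h2 hlt
                rw [← hxx] at this
                rw [this] at hx'm; exact absurd hx'm (by simp)
      · exact Bool.eq_false_iff.2 hlt
    refine ⟨?_, ?_⟩
    · rcases List.mem_cons.1 hmem with h | h
      · rw [h, hx']
        split
        · exact List.mem_cons_of_mem _ List.mem_cons_self
        · exact List.mem_cons_self
      · exact List.mem_cons_of_mem _ (List.mem_cons_of_mem _ h)
    · intro y hy
      rcases List.mem_cons.1 hy with h | h
      · exact key y (Or.inl h)
      · rcases List.mem_cons.1 h with h | h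
        · exact key y (Or.inr h)
        · exact hmin y (List.mem_cons_of_mem _ h)

lemma pvMin?_spec {s : List (Int × Int)} {m : Int × Int} (h : pvMin? s = some m) :
    m ∈ s ∧ ∀ y ∈ s, pvLtb y m = false := by
  cases s with
  | nil => exact absurd h (by simp [pvMin?])
  | cons x xs =>
    have h' : m = xs.foldl (fun m c => if pvLtb c m then c else m) x := by
      simpa [pvMin?] using h.symm
    obtain ⟨hmem, hmin⟩ := pvFoldMin_spec xs x
    exact ⟨h' ▸ hmem, fun y hy => h' ▸ hmin y hy⟩
lemma pvMin?_eq_none_iff (s : List (Int × Int)) : pvMin? s = none ↔ s = [] := by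
  cases s <;> simp [pvMin?]
-- the minimum is unique, so any witness that is minimal IS the pvMin?
lemma pvMin?_eq_some {s : List (Int × Int)} {m : Int × Int}
    (hm : m ∈ s) (hmin : ∀ y ∈ s, pvLtb y m = false) : pvMin? s = some m := by
  cases hsome : pvMin? s with
  | none => rw [pvMin?_eq_none_iff] at hsome; subst hsome; exact absurd hm (by simp)
  | some m' =>
    obtain ⟨hm', hmin'⟩ := pvMin?_spec hsome
    by_cases he : m' = m
    · exact congrArg some he
    · exfalso
      rcases pvLtb_total he with h | h
      · exact absurd h (by rw [hmin m' hm']; simp)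
      · exact absurd h (by rw [hmin' m hm]; simp)

-- on a lex-sorted list, the first element satisfying p is minimal among the satisfiers
lemma pvFind?_sorted_min {s : List (Int × Int)} {p : Int × Int → Bool} {o : Int × Int}
    (hs : s.Pairwise (fun a b => pvLtb a b = true)) (h : s.find? p = some o) :
    ∀ y ∈ s, p y = true → pvLtb y o = false := by
  induction s with
  | nil => intro y hy; exact absurd hy (by simp)
  | cons a t ih =>
    rw [List.pairwise_cons] at hs
    rw [List.find?_cons] at h
    intro y hy hpy
    cases hpa : p a with
    | true =>
      rw [hpa] at h
      simp only [Option.some.injEq] at h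
      subst h
      rcases List.mem_cons.1 hy with rfl | hyt
      · exact pvLtb_irrefl y
      · exact pvLtb_asymm (hs.1 y hyt)
    | false =>
      rw [hpa] at h
      rcases List.mem_cons.1 hy with rfl | hyt
      · exact absurd hpy (by rw [hpa]; simp)
      · exact ih hs.2 h y hyt hpy

-- removing a present element of a duplicate-free set shortens it by one
lemma pvDiscard_length {u : PySem.Set (Int × Int)} {nb : Int × Int}
    (hu : u.Nodup) (h : nb ∈ u) : (PySem.Set.discard u nb).length + 1 = u.length := by
  have hnd : (nb :: PySem.Set.discard u nb).Nodup := by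
    rw [List.nodup_cons]
    refine ⟨fun hc => ?_, PySem.Set.nodup_discard u nb hu⟩
    exact absurd ((PySem.Set.mem_discard _ _ _).1 hc).2 (by simp)
  have hperm : u.Perm (nb :: PySem.Set.discard u nb) := by
    rw [List.perm_ext_iff_of_nodup hu hnd]
    intro x
    rw [List.mem_cons, PySem.Set.mem_discard]
    constructor
    · intro hx; by_cases he : x = nb
      · exact Or.inl he
      · exact Or.inr ⟨hx, he⟩
    · rintro (rfl | ⟨hx, _⟩)
      · exact h
      · exact hx
  rw [hperm.length_eq]; simp

-- the generic neighbour-moving fold: elements of l that are in u move from u to f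
lemma pvMoveFold_spec : ∀ (l : List (Int × Int)) (f u : PySem.Set (Int × Int)),
    f.Nodup → u.Nodup → (∀ x, x ∈ f → x ∉ u) →
    (∀ x, x ∈ (l.foldl (fun fu nb =>
        if PySem.Set.contains fu.2 nb then (PySem.Set.add fu.1 nb, PySem.Set.discard fu.2 nb)
        else fu) (f, u)).1 ↔ x ∈ f ∨ (x ∈ l ∧ x ∈ u)) ∧
    (∀ x, x ∈ (l.foldl (fun fu nb =>
        if PySem.Set.contains fu.2 nb then (PySem.Set.add fu.1 nb, PySem.Set.discard fu.2 nb)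
        else fu) (f, u)).2 ↔ x ∈ u ∧ x ∉ l) ∧
    (l.foldl (fun fu nb =>
        if PySem.Set.contains fu.2 nb then (PySem.Set.add fu.1 nb, PySem.Set.discard fu.2 nb)
        else fu) (f, u)).1.Nodup ∧
    (l.foldl (fun fu nb =>
        if PySem.Set.contains fu.2 nb then (PySem.Set.add fu.1 nb, PySem.Set.discard fu.2 nb)
        else fu) (f, u)).2.Nodup ∧
    (l.foldl (fun fu nb =>
        if PySem.Set.contains fu.2 nb then (PySem.Set.add fu.1 nb, PySem.Set.discard fu.2 nb)
        else fu) (f, u)).1.length + (l.foldl (fun fu nb =>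
        if PySem.Set.contains fu.2 nb then (PySem.Set.add fu.1 nb, PySem.Set.discard fu.2 nb)
        else fu) (f, u)).2.length = f.length + u.length := by
  intro l
  induction l with
  | nil =>
    intro f u hf hu hdisj
    refine ⟨fun x => by simp, fun x => by simp, hf, hu, rfl⟩
  | cons nb rest ih =>
    intro f u hf hu hdisj
    rw [List.foldl_cons]
    by_cases hnb : nb ∈ u
    · rw [if_pos (by rwa [PySem.Set.contains_iff])]
      have hnbf : nb ∉ f := fun hc => hdisj nb hc hnb
      have hf' : (PySem.Set.add f nb).Nodup := PySem.Set.nodup_add f nb hf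
      have hu' : (PySem.Set.discard u nb).Nodup := PySem.Set.nodup_discard u nb hu
      have hdisj' : ∀ x, x ∈ PySem.Set.add f nb → x ∉ PySem.Set.discard u nb := by
        intro x hx hc
        rw [PySem.Set.mem_discard] at hc
        rcases (PySem.Set.mem_add _ _ _).1 hx with h | rfl
        · exact hdisj x h hc.1
        · exact hc.2 rfl
      obtain ⟨h1, h2, h3, h4, h5⟩ := ih (PySem.Set.add f nb) (PySem.Set.discard u nb) hf' hu' hdisj'
      refine ⟨?_, ?_, h3, h4, ?_⟩
      · intro x
        rw [h1 x, PySem.Set.mem_add, PySem.Set.mem_discard, List.mem_cons]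
        constructor
        · rintro ((hx | rfl) | ⟨hx, hxu, _⟩)
          · exact Or.inl hx
          · exact Or.inr ⟨Or.inl rfl, hnb⟩
          · exact Or.inr ⟨Or.inr hx, hxu⟩
        · rintro (hx | ⟨(rfl | hx), hxu⟩)
          · exact Or.inl (Or.inl hx)
          · exact Or.inl (Or.inr rfl)
          · by_cases he : x = nb
            · exact Or.inl (Or.inr he)
            · exact Or.inr ⟨hx, hxu, he⟩
      · intro x
        rw [h2 x, PySem.Set.mem_discard, List.mem_cons]
        constructor
        · rintro ⟨⟨hxu, hne⟩, hnr⟩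
          exact ⟨hxu, by rintro (rfl | hx); exact hne rfl; exact hnr hx⟩
        · rintro ⟨hxu, hnl⟩
          exact ⟨⟨hxu, fun he => hnl (Or.inl he)⟩, fun hx => hnl (Or.inr hx)⟩
      · rw [h5, PySem.Set.add_of_not_mem hnbf, List.length_append, List.length_singleton]
        have := pvDiscard_length hu hnb
        omega
    · rw [if_neg (by rw [PySem.Set.contains_iff]; exact hnb)]
      obtain ⟨h1, h2, h3, h4, h5⟩ := ih f u hf hu hdisj
      refine ⟨?_, ?_, h3, h4, h5⟩
      · intro x
        rw [h1 x, List.mem_cons]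
        constructor
        · rintro (hx | ⟨hx, hxu⟩)
          · exact Or.inl hx
          · exact Or.inr ⟨Or.inr hx, hxu⟩
        · rintro (hx | ⟨(rfl | hx), hxu⟩)
          · exact Or.inl hx
          · exact absurd hxu hnb
          · exact Or.inr ⟨hx, hxu⟩
      · intro x
        rw [h2 x, List.mem_cons]
        constructor
        · rintro ⟨hxu, hnr⟩
          refine ⟨hxu, ?_⟩
          rintro (rfl | hx)
          · exact hnb hxu
          · exact hnr hx
        · rintro ⟨hxu, hnl⟩
          exact ⟨hxu, fun hx => hnl (Or.inr hx)⟩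

-- characterisation of the neighbour-moving fold
lemma pvMoveNbrs_spec (c : Int × Int) (f u : PySem.Set (Int × Int))
    (hf : f.Nodup) (hu : u.Nodup) (hdisj : ∀ x, x ∈ f → x ∉ u) :
    (∀ x, x ∈ (pvMoveNbrs c (f, u)).1 ↔ x ∈ f ∨ (x ∈ pvNbrs c ∧ x ∈ u)) ∧
    (∀ x, x ∈ (pvMoveNbrs c (f, u)).2 ↔ x ∈ u ∧ x ∉ pvNbrs c) ∧
    (pvMoveNbrs c (f, u)).1.Nodup ∧ (pvMoveNbrs c (f, u)).2.Nodup ∧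
    (pvMoveNbrs c (f, u)).1.length + (pvMoveNbrs c (f, u)).2.length = f.length + u.length := by
  unfold pvMoveNbrs
  exact pvMoveFold_spec (pvNbrs c) f u hf hu hdisj

-- A's growth never lengthens the remaining list
lemma pvGrowA_len (fuel : Nat) (reg rem : List (Int × Int)) :
    (pvGrowA fuel reg rem).2.length ≤ rem.length := by
  induction fuel generalizing reg rem with
  | zero => exact Nat.le_refl _
  | succ f ih =>
    rw [pvGrowA]
    cases hfind : rem.find? (fun o => pvAdjA o reg) with
    | none => exact Nat.le_refl _
    | some o =>
      have ho : o ∈ rem := List.mem_of_find?_eq_some hfind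
      dsimp only
      rw [PySem.List.remove?_eq_some_erase rem o ho]
      calc (pvGrowA f (reg ++ [o]) ((some (rem.erase o)).getD rem)).2.length
          ≤ (rem.erase o).length := ih _ _
        _ ≤ rem.length := List.length_erase_le

-- B's growth loop is over when the frontier is empty
lemma pvGrowB_nil_frontier (fb : Nat) (reg : List (Int × Int)) (unv : PySem.Set (Int × Int)) :
    pvGrowB fb reg [] unv = (reg, unv) := by
  cases fb <;> rfl

-- main bisimulation: A's (region, remaining-list) against B's (region, frontier, unvisited),
-- with frontier = the remaining cells adjacent to the region, unvisited = the others
lemma pvGrow_eq : ∀ (fa fb : Nat) (reg rem : List (Int × Int))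
    (frontier unvisited : PySem.Set (Int × Int)),
    rem.Pairwise (fun a b => pvLtb a b = true) →
    (∀ x, x ∈ frontier ↔ x ∈ rem ∧ pvAdjA x reg = true) →
    (∀ x, x ∈ unvisited ↔ x ∈ rem ∧ pvAdjA x reg = false) →
    frontier.Nodup → unvisited.Nodup →
    rem.length ≤ fa → frontier.length + unvisited.length ≤ fb →
    (pvGrowA fa reg rem).1 = (pvGrowB fb reg frontier unvisited).1 ∧
    (pvGrowA fa reg rem).2.Pairwise (fun a b => pvLtb a b = true) ∧
    (∀ x, x ∈ (pvGrowB fb reg frontier unvisited).2 ↔ x ∈ (pvGrowA fa reg rem).2) ∧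
    (pvGrowB fb reg frontier unvisited).2.Nodup := by
  intro fa
  induction fa with
  | zero =>
    intro fb reg rem frontier unvisited hsort hfr hunv hfnd hund hfa hfb
    have hrem : rem = [] := List.eq_nil_of_length_eq_zero (Nat.le_zero.1 hfa)
    subst hrem
    have hfr0 : frontier = [] := List.eq_nil_iff_forall_not_mem.2 (fun x hx => by
      simpa using (hfr x).1 hx)
    subst hfr0
    rw [pvGrowB_nil_frontier]
    refine ⟨rfl, List.Pairwise.nil, fun x => ?_, hund⟩
    show x ∈ unvisited ↔ x ∈ ([] : List (Int × Int))
    exact ⟨fun h => ((hunv x).1 h).1, fun h => absurd h (by simp)⟩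
  | succ fa' ih =>
    intro fb reg rem frontier unvisited hsort hfr hunv hfnd hund hfa hfb
    rw [pvGrowA]
    cases hfind : rem.find? (fun o => pvAdjA o reg) with
    | none =>
      have hfr0 : frontier = [] := List.eq_nil_iff_forall_not_mem.2 (fun x hx => by
        obtain ⟨hxr, hxa⟩ := (hfr x).1 hx
        have := List.find?_eq_none.1 hfind x hxr
        exact this hxa)
      subst hfr0
      rw [pvGrowB_nil_frontier]
      refine ⟨rfl, hsort, fun x => ?_, hund⟩
      constructor
      · intro h; exact ((hunv x).1 h).1
      · intro h
        rw [hunv x]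
        refine ⟨h, ?_⟩
        have := List.find?_eq_none.1 hfind x h
        simpa using this
    | some o =>
      have ho : o ∈ rem := List.mem_of_find?_eq_some hfind
      have hpo : pvAdjA o reg = true := by
        have := List.find?_some hfind
        simpa using this
      have hof : o ∈ frontier := (hfr o).2 ⟨ho, hpo⟩
      obtain ⟨fb', rfl⟩ : ∃ fb', fb = fb' + 1 := by
        cases fb with
        | zero =>
          exfalso
          have : frontier.length = 0 := by omega
          rw [List.length_eq_zero_iff] at this
          rw [this] at hof
          exact absurd hof (by simp)
        | succ fb' => exact ⟨fb', rfl⟩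
      have hmin : pvMin? frontier = some o := by
        apply pvMin?_eq_some hof
        intro y hy
        obtain ⟨hyr, hya⟩ := (hfr y).1 hy
        exact pvFind?_sorted_min hsort hfind y hyr hya
      rw [pvGrowB, hmin]
      dsimp only
      rw [PySem.List.remove?_eq_some_erase rem o ho]
      dsimp only [Option.getD_some]
      -- facts about the old sets
      have hnodup_rem : rem.Nodup := hsort.imp (fun h => pvLtb_ne h)
      have hdisjFU : ∀ x, x ∈ PySem.Set.discard frontier o → x ∉ unvisited := by
        intro x hx hc
        rw [PySem.Set.mem_discard] at hx
        have h1 := ((hfr x).1 hx.1).2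
        have h2 := ((hunv x).1 hc).2
        rw [h1] at h2; exact absurd h2 (by simp)
      obtain ⟨h1, h2, h3, h4, h5⟩ := pvMoveNbrs_spec o (PySem.Set.discard frontier o) unvisited
        (PySem.Set.nodup_discard frontier o hfnd) hund hdisjFU
      have hono : o ∉ pvNbrs o := by
        rw [pvMem_nbrs]
        simp
      -- the new invariants on rem.erase o
      have hmem_rem' : ∀ x : Int × Int, x ∈ rem.erase o ↔ x ∈ rem ∧ x ≠ o := by
        intro x
        rw [List.Nodup.mem_erase_iff hnodup_rem]
        exact ⟨fun h => ⟨h.2, h.1⟩, fun h => ⟨h.2, h.1⟩⟩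
      have hxuo : ∀ x : Int × Int, x ∈ unvisited → x ≠ o := by
        intro x hx he
        subst he
        have := ((hunv x).1 hx).2
        rw [hpo] at this; exact absurd this (by simp)
      have hfr' : ∀ x, x ∈ (pvMoveNbrs o (PySem.Set.discard frontier o, unvisited)).1 ↔
          x ∈ rem.erase o ∧ pvAdjA x (reg ++ [o]) = true := by
        intro x
        rw [h1 x, PySem.Set.mem_discard, hmem_rem', pvAdjA_append]
        constructor
        · rintro (⟨hx, hne⟩ | ⟨hxn, hxu⟩)
          · obtain ⟨hxr, hxa⟩ := (hfr x).1 hx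
            exact ⟨⟨hxr, hne⟩, by rw [hxa]; simp⟩
          · obtain ⟨hxr, hxa⟩ := (hunv x).1 hxu
            refine ⟨⟨hxr, hxuo x hxu⟩, ?_⟩
            simp [hxn]
        · rintro ⟨⟨hxr, hne⟩, hadj⟩
          rw [Bool.or_eq_true] at hadj
          cases hadja : pvAdjA x reg with
          | true => exact Or.inl ⟨(hfr x).2 ⟨hxr, hadja⟩, hne⟩
          | false =>
            rcases hadj with h | h
            · rw [hadja] at h; exact absurd h (by simp)
            · rw [decide_eq_true_iff] at h
              exact Or.inr ⟨h, (hunv x).2 ⟨hxr, hadja⟩⟩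
      have hunv' : ∀ x, x ∈ (pvMoveNbrs o (PySem.Set.discard frontier o, unvisited)).2 ↔
          x ∈ rem.erase o ∧ pvAdjA x (reg ++ [o]) = false := by
        intro x
        rw [h2 x, hmem_rem', pvAdjA_append]
        constructor
        · rintro ⟨hxu, hxn⟩
          obtain ⟨hxr, hxa⟩ := (hunv x).1 hxu
          refine ⟨⟨hxr, hxuo x hxu⟩, ?_⟩
          rw [hxa]
          simp [hxn]
        · rintro ⟨⟨hxr, hne⟩, hadj⟩
          rw [Bool.or_eq_false_iff] at hadj
          obtain ⟨ha1, ha2⟩ := hadj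
          rw [decide_eq_false_iff_not] at ha2
          exact ⟨(hunv x).2 ⟨hxr, ha1⟩, ha2⟩
      -- fuel bounds
      have hlen_rem' : (rem.erase o).length ≤ fa' := by
        have := List.length_erase_of_mem ho
        have hpos : 0 < rem.length := List.length_pos_of_mem ho
        omega
      have hlen_fb' : (pvMoveNbrs o (PySem.Set.discard frontier o, unvisited)).1.length +
          (pvMoveNbrs o (PySem.Set.discard frontier o, unvisited)).2.length ≤ fb' := by
        rw [h5]
        have := pvDiscard_length hfnd hof
        omega
      exact ih fb' (reg ++ [o]) (rem.erase o) _ _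
        (hsort.sublist (List.erase_sublist))
        hfr' hunv' h3 h4 hlen_rem' hlen_fb'

-- B's outer loop is over when the unvisited set is empty
lemma pvSplitB_nil (fb : Nat) : pvSplitB fb [] = [] := by
  cases fb <;> rfl

-- the outer loops agree on a lex-sorted duplicate-free cell list
lemma pvSplit_eq : ∀ (fa fb : Nat) (cells : List (Int × Int)) (unv : PySem.Set (Int × Int)),
    cells.Pairwise (fun a b => pvLtb a b = true) →
    (∀ x, x ∈ unv ↔ x ∈ cells) → unv.Nodup →
    cells.length ≤ fa → unv.length ≤ fb →
    pvSplitA fa cells = pvSplitB fb unv := by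
  intro fa
  induction fa with
  | zero =>
    intro fb cells unv hsort hmem hund hfa hfb
    have hc : cells = [] := List.eq_nil_of_length_eq_zero (Nat.le_zero.1 hfa)
    subst hc
    have hu : unv = [] := List.eq_nil_iff_forall_not_mem.2 (fun x hx => by
      simpa using (hmem x).1 hx)
    subst hu
    rw [pvSplitB_nil]
    rfl
  | succ fa' ih =>
    intro fb cells unv hsort hmem hund hfa hfb
    cases cells with
    | nil =>
      have hu : unv = [] := List.eq_nil_iff_forall_not_mem.2 (fun x hx => by
        simpa using (hmem x).1 hx)
      subst hu
      rw [pvSplitB_nil]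
      rfl
    | cons c rest =>
      rw [List.pairwise_cons] at hsort
      obtain ⟨hc_lt, hrest⟩ := hsort
      have hcu : c ∈ unv := (hmem c).2 List.mem_cons_self
      obtain ⟨fb', rfl⟩ : ∃ fb', fb = fb' + 1 := by
        cases fb with
        | zero =>
          exfalso
          have : unv.length = 0 := by omega
          rw [List.length_eq_zero_iff] at this
          rw [this] at hcu
          exact absurd hcu (by simp)
        | succ fb' => exact ⟨fb', rfl⟩
      have hcnr : c ∉ rest := fun hc => absurd (hc_lt c hc) (by rw [pvLtb_irrefl]; simp)
      have hmin : pvMin? unv = some c := by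
        apply pvMin?_eq_some hcu
        intro y hy
        rcases List.mem_cons.1 ((hmem y).1 hy) with rfl | hyr
        · exact pvLtb_irrefl y
        · exact pvLtb_asymm (hc_lt y hyr)
      rw [pvSplitA, pvSplitB, hmin]
      dsimp only
      -- the discarded set is exactly rest (as a set)
      have hdisc : ∀ x : Int × Int, x ∈ PySem.Set.discard unv c ↔ x ∈ rest := by
        intro x
        rw [PySem.Set.mem_discard, hmem x]
        constructor
        · rintro ⟨hx, hne⟩
          rcases List.mem_cons.1 hx with rfl | h
          · exact absurd rfl hne
          · exact h
        · intro hx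
          exact ⟨List.mem_cons_of_mem _ hx, fun he => hcnr (he ▸ hx)⟩
      obtain ⟨h1, h2, h3, h4, h5⟩ := pvMoveNbrs_spec c PySem.Set.empty (PySem.Set.discard unv c)
        (by simp [PySem.Set.empty]) (PySem.Set.nodup_discard unv c hund)
        (fun x hx => absurd hx (by simp [PySem.Set.empty]))
      have hadj1 : ∀ x : Int × Int, pvAdjA x [c] = decide (x ∈ pvNbrs c) := by
        intro x
        have := pvAdjA_append x c []
        simpa [pvAdjA] using this
      have hfr : ∀ x, x ∈ (pvMoveNbrs c (PySem.Set.empty, PySem.Set.discard unv c)).1 ↔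
          x ∈ rest ∧ pvAdjA x [c] = true := by
        intro x
        rw [h1 x, hadj1 x, decide_eq_true_iff]
        simp only [PySem.Set.empty, List.not_mem_nil, false_or, hdisc x]
        exact ⟨fun h => ⟨h.2, h.1⟩, fun h => ⟨h.2, h.1⟩⟩
      have hunv : ∀ x, x ∈ (pvMoveNbrs c (PySem.Set.empty, PySem.Set.discard unv c)).2 ↔
          x ∈ rest ∧ pvAdjA x [c] = false := by
        intro x
        rw [h2 x, hadj1 x, decide_eq_false_iff_not, hdisc x]
      obtain ⟨hA1, hA2, hA3, hA4⟩ := pvGrow_eq rest.length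
        ((pvMoveNbrs c (PySem.Set.empty, PySem.Set.discard unv c)).1.length +
         (pvMoveNbrs c (PySem.Set.empty, PySem.Set.discard unv c)).2.length)
        [c] rest _ _ hrest hfr hunv h3 h4 (Nat.le_refl _) (Nat.le_refl _)
      rw [← hA1]
      congr 1
      -- lengths for the recursive call
      have hpnodup : (pvGrowA rest.length [c] rest).2.Nodup :=
        hA2.imp (fun h => pvLtb_ne h)
      have hperm : (pvGrowB _ [c] _ _).2.Perm (pvGrowA rest.length [c] rest).2 :=
        (List.perm_ext_iff_of_nodup hA4 hpnodup).2 hA3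
      have hulen : unv.length = rest.length + 1 := by
        have hcellsnodup : (c :: rest).Nodup := by
          rw [List.nodup_cons]
          exact ⟨hcnr, hrest.imp (fun h => pvLtb_ne h)⟩
        have : unv.Perm (c :: rest) := (List.perm_ext_iff_of_nodup hund hcellsnodup).2 hmem
        simpa using this.length_eq
      apply ih
      · exact hA2
      · exact hA3
      · exact hA4
      · calc (pvGrowA rest.length [c] rest).2.length ≤ rest.length := pvGrowA_len _ _ _
          _ ≤ fa' := by simpa using hfa
      · calc (pvGrowB _ [c] _ _).2.length = (pvGrowA rest.length [c] rest).2.length :=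
            hperm.length_eq
          _ ≤ rest.length := pvGrowA_len _ _ _
          _ ≤ fb' := by omega

-- every value of the grouping dict is lex-sorted (cells are appended in row-major order)
lemma pvGroup_values_sorted (gm : List (List String)) (yr : Int) (p : String)
    (cells : List (Int × Int))
    (h : (p, cells) ∈ ((PySem.List.pyRange 0 (PySem.List.len gm) 1).foldl (fun d x =>
        (PySem.List.pyRange 0 yr 1).foldl (fun d y =>
          let q := PySem.List.pyGetD (PySem.List.pyGetD gm x []) y ""
          d.insert q (d.getD q [] ++ [(x, y)])) d) PySem.Dict.empty).items) :
    cells.Pairwise (fun a b => pvLtb a b = true) := by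
  have hG : ((PySem.List.pyRange 0 (PySem.List.len gm) 1).foldl (fun d x =>
        (PySem.List.pyRange 0 yr 1).foldl (fun d y =>
          let q := PySem.List.pyGetD (PySem.List.pyGetD gm x []) y ""
          d.insert q (d.getD q [] ++ [(x, y)])) d) PySem.Dict.empty)
      = ((PySem.List.pyRange 0 (PySem.List.len gm) 1).flatMap (fun x =>
          (PySem.List.pyRange 0 yr 1).map (fun y =>
            (PySem.List.pyGetD (PySem.List.pyGetD gm x []) y "", (x, y))))).foldl
          (fun d pr => d.modify pr.1 [] (· ++ [pr.2])) PySem.Dict.empty := by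
    rw [List.foldl_flatMap]
    simp only [List.foldl_map]
    rfl
  rw [hG] at h
  have hnd : (((PySem.List.pyRange 0 (PySem.List.len gm) 1).flatMap (fun x =>
          (PySem.List.pyRange 0 yr 1).map (fun y =>
            (PySem.List.pyGetD (PySem.List.pyGetD gm x []) y "", (x, y))))).foldl
          (fun d pr => d.modify pr.1 [] (· ++ [pr.2])) PySem.Dict.empty).keys.Nodup := by
    apply PySem.Dict.nodup_keys_foldl_modify_key
    simp
  have hval := PySem.Dict.getD_of_mem_items _ h hnd []
  rw [PySem.Dict.getD_foldl_modify_append] at hval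
  simp only [PySem.Dict.getD_empty, List.nil_append] at hval
  rw [← hval]
  -- the second components of the row-major pair list are lex-sorted
  have hLp : (((PySem.List.pyRange 0 (PySem.List.len gm) 1).flatMap (fun x =>
        (PySem.List.pyRange 0 yr 1).map (fun y =>
          (PySem.List.pyGetD (PySem.List.pyGetD gm x []) y "", (x, y))))).map (·.2)).Pairwise
      (fun a b => pvLtb a b = true) := by
    rw [List.map_flatMap]
    simp only [List.map_map]
    rw [List.pairwise_flatMap]
    constructor
    · intro a _
      rw [List.pairwise_map]
      apply (PySem.List.pairwise_lt_pyRange_one 0 yr).imp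
      intro y1 y2 hy
      simp only [Function.comp_apply, pvLtb]
      simp [hy]
    · apply (PySem.List.pairwise_lt_pyRange_one 0 (PySem.List.len gm)).imp
      intro x1 x2 hx p1 hp1 p2 hp2
      simp only [List.mem_map, Function.comp_apply] at hp1 hp2
      obtain ⟨y1, _, rfl⟩ := hp1
      obtain ⟨y2, _, rfl⟩ := hp2
      simp only [pvLtb]
      simp [hx]
  exact hLp.sublist (List.Sublist.map _ List.filter_sublist)

-- A's if-in-else grouping step is B's get-with-default step
lemma pvStepA_eq {d : PySem.Dict String (List (Int × Int))} (p : String) (xy : Int × Int) :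
    (match d.get? p with
     | some v => d.insert p (v ++ [xy])
     | none => d.insert p [xy]) = d.insert p (d.getD p [] ++ [xy]) := by
  rw [PySem.Dict.getD_eq_get?_getD]
  cases h : d.get? p <;> simp

-- ===== VERDICT (by name: the statement is the Claim_ definition above) =====
theorem get_map_data_spec : Claim_equal_get_map_data := by
  intro s hdom hpre
  unfold Spec_get_map_data
  simp only [get_map_data, get_map_data_alt]
  -- A's if-in-else grouping loop is B's get-with-default grouping loop, pointwise
  have hstep : (fun (d : PySem.Dict String (List (Int × Int))) (x : Int) =>
        (PySem.List.pyRange 0 (PySem.List.len (PySem.List.pyGetD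
            (((PySem.Str.split? s "\n").getD []).map (fun (l : String) => l.toList.map fun c => String.mk [c])) 0 [])) 1).foldl (fun d y =>
          let p := PySem.List.pyGetD (PySem.List.pyGetD (((PySem.Str.split? s "\n").getD []).map (fun (l : String) => l.toList.map fun c => String.mk [c])) x []) y ""
          match d.get? p with
          | some v => d.insert p (v ++ [(x, y)])
          | none => d.insert p [(x, y)]) d)
      = (fun (d : PySem.Dict String (List (Int × Int))) (x : Int) =>
        (PySem.List.pyRange 0 (PySem.List.len (PySem.List.pyGetD
            (((PySem.Str.split? s "\n").getD []).map (fun (l : String) => l.toList.map fun c => String.mk [c])) 0 [])) 1).foldl (fun d y =>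
          let p := PySem.List.pyGetD (PySem.List.pyGetD (((PySem.Str.split? s "\n").getD []).map (fun (l : String) => l.toList.map fun c => String.mk [c])) x []) y ""
          d.insert p (d.getD p [] ++ [(x, y)])) d) := by
    funext d x
    congr 1
    funext d y
    exact pvStepA_eq _ _
  rw [hstep]
  simp only [Prod.mk.injEq]
  refine ⟨trivial, trivial, trivial, ?_⟩
  congr 1
  apply PySem.List.foldl_congr_mem
  intro r pr hpr
  obtain ⟨p, cells⟩ := pr
  have hsorted := pvGroup_values_sorted
    (((PySem.Str.split? s "\n").getD []).map (fun (l : String) => l.toList.map fun c => String.mk [c]))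
    (PySem.List.len (PySem.List.pyGetD
      (((PySem.Str.split? s "\n").getD []).map (fun (l : String) => l.toList.map fun c => String.mk [c])) 0 []))
    p cells hpr
  congr 1
  exact pvSplit_eq cells.length (PySem.Set.ofList cells).length cells (PySem.Set.ofList cells)
    hsorted (fun x => PySem.Set.mem_ofList cells x) (PySem.Set.nodup_ofList cells) (Nat.le_refl _) (Nat.le_refl _)
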